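-- pv_equiv track=rewrite | github.com/kdh4970/CodingTest | Programmers/LV2/더 맵게.py | solution
-- ===== SOURCE A (Python) =====
-- from heapq import heappush,heappop,heapify
--
-- def solution(scoville, K):
--     answer = 0
--     heapify(scoville)
--     while len(scoville)>1 and scoville[0]<K:
--         heappush(scoville,heappop(scoville)+(heappop(scoville)*2))
--         answer +=1
--     if scoville[0]<K:
--         answer = -1
--     return answer
-- ===== SOURCE B (Python) =====
-- def solution(scoville, K):
--     s = sorted(scoville)
--     answer = 0
--     while len(s) > 1 and s[0] < K:
--         a, b = s[0], s[1]
--         s = s[2:]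
--         v = a + 2 * b
--         i = 0
--         while i < len(s) and s[i] < v:
--             i += 1
--         s.insert(i, v)
--         answer += 1
--     if s[0] < K:
--         answer = -1
--     return answer
-- ===== Notes on version B (the rewrite author's own statement) =====
-- stated objective: simpler
-- what changed: Replaces the binary heap (heapify/heappush/heappop) with a single upfront sort plus ordered insertion of each mixed value, so no heap structure is ever maintained.
import Mathlib
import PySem

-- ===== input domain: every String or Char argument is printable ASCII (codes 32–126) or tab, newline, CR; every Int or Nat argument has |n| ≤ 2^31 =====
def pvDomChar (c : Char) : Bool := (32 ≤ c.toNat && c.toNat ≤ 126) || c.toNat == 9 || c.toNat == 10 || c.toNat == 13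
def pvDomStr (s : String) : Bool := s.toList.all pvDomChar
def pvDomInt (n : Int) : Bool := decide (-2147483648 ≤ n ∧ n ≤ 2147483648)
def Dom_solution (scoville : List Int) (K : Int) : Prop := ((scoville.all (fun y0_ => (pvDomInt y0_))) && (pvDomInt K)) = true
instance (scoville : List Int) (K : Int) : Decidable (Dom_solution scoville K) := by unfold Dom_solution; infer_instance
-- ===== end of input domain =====

-- B replaces A's binary heap (heapify/heappush/heappop) with one upfront sort plus ordered
-- insertion of each mixed value (simpler; not claimed faster). A heapifies its argument list
-- in place; the equivalence proved here is about the RETURN value only (B does not mutate).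

-- ===== PORT A =====
-- A calls the heapq library; heapify/heappush/heappop are ported as a min-heap (skew-heap
-- representation) with the same semantics: pop returns the minimum. Nat fuel arguments only
-- make the recursions structural (always sufficient); they change no computed value.
inductive PHeap where
  | nil : PHeap
  | node : Int → PHeap → PHeap → PHeap
deriving DecidableEq, Repr

def PHeap.size : PHeap → Nat
  | .nil => 0
  | .node _ l r => l.size + r.size + 1

def PHeap.mergeGo : Nat → PHeap → PHeap → PHeap
  | _ + 1, .nil, h => h
  | _ + 1, .node x l r, .nil => .node x l r
  | fuel + 1, .node x l r, .node y l' r' =>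
    if x ≤ y then .node x (PHeap.mergeGo fuel r (.node y l' r')) l
    else .node y (PHeap.mergeGo fuel r' (.node x l r)) l'
  | 0, _, _ => .nil   -- never reached: fuel = size a + size b suffices

def PHeap.merge (a b : PHeap) : PHeap := PHeap.mergeGo (a.size + b.size) a b

-- heappush(h, v)
def PHeap.push (h : PHeap) (v : Int) : PHeap := PHeap.merge (.node v .nil .nil) h

-- heapify(xs)
def PHeap.heapify (xs : List Int) : PHeap := xs.foldl PHeap.push .nil

-- the while loop of A: pop the two minima, push first + second*2, count; fuel = heap size
def loopA : Nat → PHeap → Int → Int → PHeap × Int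
  | 0, h, _, answer => (h, answer)
  | fuel + 1, h, K, answer =>
    match h with
    | .nil => (.nil, answer)
    | .node x l r =>
      if 1 < (PHeap.node x l r).size ∧ x < K then
        match PHeap.merge l r with
        | .node y l2 r2 => loopA fuel (PHeap.push (PHeap.merge l2 r2) (x + y * 2)) K (answer + 1)
        | .nil => (PHeap.node x l r, answer)   -- unreachable: size > 1
      else (PHeap.node x l r, answer)

def solution (scoville : List Int) (K : Int) : Int :=
  match loopA (PHeap.heapify scoville).size (PHeap.heapify scoville) K 0 with
  | (h', answer) =>
    match h' with
    | .nil => -1   -- Python raises IndexError here (scoville = []); excluded by Pre_solution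
    | .node x _ _ => if x < K then -1 else answer

-- ===== PORT B =====
-- the inner index loop of Source B: insert v before the first element ≥ v
def insortB (s : List Int) (v : Int) : List Int :=
  match s with
  | [] => [v]
  | x :: xs => if x < v then x :: insortB xs v else v :: x :: xs

-- the while loop of Source B on the sorted list; fuel = list length (always sufficient)
def loopB : Nat → List Int → Int → Int → List Int × Int
  | 0, s, _, answer => (s, answer)
  | fuel + 1, s, K, answer =>
    match s with
    | a :: b :: rest =>
      if a < K then loopB fuel (insortB rest (a + 2 * b)) K (answer + 1)
      else (a :: b :: rest, answer)
    | _ => (s, answer)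

def solution_alt (scoville : List Int) (K : Int) : Int :=
  match loopB (PySem.List.sorted scoville (fun x => x) false).length
      (PySem.List.sorted scoville (fun x => x) false) K 0 with
  | (s', answer) =>
    match s' with
    | [] => -1   -- Python raises IndexError here (scoville = []); excluded by Pre_solution
    | x :: _ => if x < K then -1 else answer

-- ===== PRECONDITION & SPEC =====
-- Pre_ excludes only the empty list, on which A (and B) raise IndexError at scoville[0].
def Pre_solution (scoville : List Int) (K : Int) : Prop := scoville ≠ []
instance (scoville : List Int) (K : Int) : Decidable (Pre_solution scoville K) := by
  unfold Pre_solution; infer_instance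

def pvWitness_solution : List Int × Int := ([1, 2, 3, 9, 10, 12], 7)

def Spec_solution (scoville : List Int) (K : Int) (out : Int) : Prop := out = solution_alt scoville K
instance (scoville : List Int) (K : Int) (out : Int) : Decidable (Spec_solution scoville K out) := by
  unfold Spec_solution; infer_instance

-- ===== CLAIM (what is proved, stated in full; the proofs are below) =====
def Claim_equal_solution : Prop := ∀ (scoville : List Int) (K : Int), Dom_solution scoville K → Pre_solution scoville K → Spec_solution scoville K (solution scoville K)

-- ===== LEMMAS AND PROOFS =====

def PHeap.toMS : PHeap → Multiset Int
  | .nil => 0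
  | .node x l r => x ::ₘ (l.toMS + r.toMS)

def PHeap.Inv : PHeap → Prop
  | .nil => True
  | .node x l r => (∀ y ∈ l.toMS + r.toMS, x ≤ y) ∧ l.Inv ∧ r.Inv

theorem PHeap.root_min {x : Int} {l r : PHeap} (h : (PHeap.node x l r).Inv) :
    ∀ z ∈ (PHeap.node x l r).toMS, x ≤ z := by
  intro z hz
  simp only [PHeap.toMS, Multiset.mem_cons] at hz
  rcases hz with rfl | hz
  · exact le_refl z
  · exact h.1 z hz

theorem PHeap.toMS_mergeGo : ∀ (fuel : Nat) (a b : PHeap), a.size + b.size ≤ fuel →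
    (PHeap.mergeGo fuel a b).toMS = a.toMS + b.toMS := by
  intro fuel a b hf
  fun_induction PHeap.mergeGo fuel a b with
  | case1 => simp [PHeap.toMS]
  | case2 => simp [PHeap.toMS]
  | case3 fuel x l r y l' r' hle ih =>
    simp only [PHeap.size] at hf
    rw [PHeap.toMS]
    rw [ih (by simp [PHeap.size]; omega)]
    simp only [PHeap.toMS, ← Multiset.singleton_add]
    abel
  | case4 fuel x l r y l' r' hle ih =>
    simp only [PHeap.size] at hf
    rw [PHeap.toMS]
    rw [ih (by simp [PHeap.size]; omega)]
    simp only [PHeap.toMS, ← Multiset.singleton_add]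
    abel
  | case5 a b => cases a <;> cases b <;> simp_all [PHeap.size, PHeap.toMS]

theorem PHeap.toMS_merge (a b : PHeap) : (PHeap.merge a b).toMS = a.toMS + b.toMS :=
  PHeap.toMS_mergeGo (a.size + b.size) a b (le_refl _)

theorem PHeap.inv_mergeGo : ∀ (fuel : Nat) (a b : PHeap), a.size + b.size ≤ fuel →
    a.Inv → b.Inv → (PHeap.mergeGo fuel a b).Inv := by
  intro fuel a b hf ha hb
  fun_induction PHeap.mergeGo fuel a b with
  | case1 => exact hb
  | case2 => exact ha
  | case3 fuel x l r y l' r' hle ih =>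
    simp only [PHeap.size] at hf
    obtain ⟨hxa, hl, hr⟩ := ha
    refine ⟨?_, ih (by simp [PHeap.size]; omega) hr hb, hl⟩
    intro z hz
    rw [PHeap.toMS_mergeGo fuel r (.node y l' r') (by simp [PHeap.size]; omega)] at hz
    simp only [Multiset.mem_add] at hz
    rcases hz with (hz | hz) | hz
    · exact hxa z (by simp [hz])
    · exact le_trans hle (PHeap.root_min hb z hz)
    · exact hxa z (by simp [hz])
  | case4 fuel x l r y l' r' hle ih =>
    simp only [PHeap.size] at hf
    obtain ⟨hyb, hl', hr'⟩ := hb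
    refine ⟨?_, ih (by simp [PHeap.size]; omega) hr' ha, hl'⟩
    intro z hz
    rw [PHeap.toMS_mergeGo fuel r' (.node x l r) (by simp [PHeap.size]; omega)] at hz
    simp only [Multiset.mem_add] at hz
    rcases hz with (hz | hz) | hz
    · exact hyb z (by simp [hz])
    · exact le_trans (by omega) (PHeap.root_min ha z hz)
    · exact hyb z (by simp [hz])
  | case5 => trivial

theorem PHeap.inv_merge {a b : PHeap} (ha : a.Inv) (hb : b.Inv) : (PHeap.merge a b).Inv :=
  PHeap.inv_mergeGo (a.size + b.size) a b (le_refl _) ha hb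

theorem PHeap.toMS_push (h : PHeap) (v : Int) : (h.push v).toMS = v ::ₘ h.toMS := by
  simp [PHeap.push, PHeap.toMS_merge, PHeap.toMS]

theorem PHeap.inv_push {h : PHeap} (hh : h.Inv) (v : Int) : (h.push v).Inv :=
  PHeap.inv_merge (by simp [PHeap.Inv, PHeap.toMS]) hh

theorem PHeap.toMS_heapify (xs : List Int) : (PHeap.heapify xs).toMS = ↑xs := by
  have : ∀ (xs : List Int) (h : PHeap), (xs.foldl PHeap.push h).toMS = h.toMS + ↑xs := by
    intro xs
    induction xs with
    | nil => simp
    | cons x t ih =>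
      intro h
      simp only [List.foldl_cons, ih, PHeap.toMS_push, ← Multiset.cons_coe,
        ← Multiset.singleton_add]
      abel
  simpa using this xs .nil

theorem PHeap.inv_heapify (xs : List Int) : (PHeap.heapify xs).Inv := by
  have : ∀ (xs : List Int) (h : PHeap), h.Inv → (xs.foldl PHeap.push h).Inv := by
    intro xs
    induction xs with
    | nil => exact fun h hh => hh
    | cons x t ih => exact fun h hh => ih _ (PHeap.inv_push hh x)
  exact this xs .nil trivial

theorem insortB_coe (s : List Int) (v : Int) : (↑(insortB s v) : Multiset Int) = v ::ₘ ↑s := by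
  induction s with
  | nil => rfl
  | cons x xs ih =>
    simp only [insortB]
    split
    · simp only [← Multiset.cons_coe, ih]
      exact Multiset.cons_swap x v ↑xs
    · rfl

theorem insortB_sorted {s : List Int} (hs : s.Sorted (· ≤ ·)) (v : Int) :
    (insortB s v).Sorted (· ≤ ·) := by
  induction s with
  | nil => exact List.sorted_cons.mpr ⟨by simp, List.sorted_nil⟩
  | cons x xs ih =>
    rw [List.sorted_cons] at hs
    simp only [insortB]
    split
    · rename_i hxv
      rw [List.sorted_cons]
      refine ⟨?_, ih hs.2⟩
      intro b hb
      have hbm : (b : Int) ∈ (↑(insortB xs v) : Multiset Int) := Multiset.mem_coe.mpr hb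
      rw [insortB_coe] at hbm
      simp only [Multiset.mem_cons, Multiset.mem_coe] at hbm
      rcases hbm with rfl | hbx
      · exact le_of_lt hxv
      · exact hs.1 b hbx
    · rename_i hxv
      push_neg at hxv
      rw [List.sorted_cons]
      refine ⟨?_, List.sorted_cons.mpr hs⟩
      intro b hb
      rcases List.mem_cons.mp hb with rfl | hbx
      · exact hxv
      · exact le_trans hxv (hs.1 b hbx)

-- head of a sorted list = root of an equal-multiset heap
theorem min_eq {x : Int} {l r : PHeap} (hInv : (PHeap.node x l r).Inv)
    {a : Int} {t : List Int} (hs : (a :: t).Sorted (· ≤ ·))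
    (hms : (PHeap.node x l r).toMS = ↑(a :: t)) : x = a := by
  have hx_mem : x ∈ (↑(a :: t) : Multiset Int) := by
    rw [← hms]; simp [PHeap.toMS]
  have ha_le_x : a ≤ x := by
    simp only [Multiset.mem_coe, List.mem_cons] at hx_mem
    rcases hx_mem with rfl | hx
    · exact le_refl x
    · exact List.rel_of_pairwise_cons hs hx
  have hx_le_a : x ≤ a := by
    apply PHeap.root_min hInv
    rw [hms]; simp
  omega

theorem PHeap.card_toMS (h : PHeap) : Multiset.card h.toMS = h.size := by
  induction h with
  | nil => rfl
  | node x l r ihl ihr => simp [PHeap.toMS, PHeap.size, ihl, ihr]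

theorem insortB_ne_nil (s : List Int) (v : Int) : insortB s v ≠ [] := by
  cases s with
  | nil => simp [insortB]
  | cons x xs => simp only [insortB]; split <;> simp

-- main loop correspondence: with equal multisets, the heap loop and the sorted-list loop
-- return the same count, and their final collections are again an equal-multiset heap/sorted pair
theorem loop_eq : ∀ (n : Nat) (h : PHeap) (s : List Int) (K answer : Int),
    h.size = n → h.Inv → s.Sorted (· ≤ ·) → h.toMS = ↑s →
    (loopA n h K answer).2 = (loopB n s K answer).2 ∧
    (loopA n h K answer).1.toMS = ↑((loopB n s K answer).1) ∧
    (loopA n h K answer).1.Inv ∧ ((loopB n s K answer).1).Sorted (· ≤ ·) ∧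
    (s ≠ [] → (loopB n s K answer).1 ≠ []) := by
  intro n
  induction n with
  | zero =>
    intro h s K answer hsz hInv hSorted hms
    exact ⟨rfl, by simpa [loopA, loopB] using hms, hInv, hSorted, fun h => h⟩
  | succ n IH =>
    intro h s K answer hsz hInv hSorted hms
    cases h with
    | nil =>
      have hs0 : s = [] := by
        have h0 : (↑s : Multiset Int) = 0 := by rw [← hms]; rfl
        exact (Multiset.coe_eq_zero s).mp h0
      subst hs0
      exact ⟨rfl, by simpa [loopA, loopB] using hms, hInv, hSorted, fun hc => absurd rfl hc⟩
    | node x l r =>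
      have hlen : s.length = (PHeap.node x l r).size := by
        have := PHeap.card_toMS (PHeap.node x l r)
        rw [hms] at this
        simpa using this
      by_cases hguard : 1 < (PHeap.node x l r).size ∧ x < K
      · -- looping case
        obtain ⟨a, b, rest, rfl⟩ : ∃ a b rest, s = a :: b :: rest := by
          have hsz2 := hguard.1
          match s, hlen with
          | a :: b :: rest, _ => exact ⟨a, b, rest, rfl⟩
          | [], hlen => rw [← hlen] at hsz2; simp at hsz2
          | [a], hlen => rw [← hlen] at hsz2; simp at hsz2
        have hxa : x = a := min_eq hInv hSorted hms
        have htail : (b :: rest).Sorted (· ≤ ·) := (List.sorted_cons.mp hSorted).2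
        have hmergeMS : (PHeap.merge l r).toMS = ↑(b :: rest) := by
          rw [PHeap.toMS_merge]
          have : x ::ₘ (l.toMS + r.toMS) = a ::ₘ ↑(b :: rest) := by
            rw [Multiset.cons_coe]; exact hms
          rw [hxa] at this
          exact (Multiset.cons_inj_right a).mp this
        obtain ⟨y, l2, r2, hm⟩ : ∃ y l2 r2, PHeap.merge l r = PHeap.node y l2 r2 := by
          cases hmm : PHeap.merge l r with
          | nil =>
            rw [hmm] at hmergeMS
            have h0 := (Multiset.coe_eq_zero (b :: rest)).mp hmergeMS.symm
            simp at h0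
          | node y l2 r2 => exact ⟨y, l2, r2, rfl⟩
        have hInvM : (PHeap.node y l2 r2).Inv := hm ▸ PHeap.inv_merge hInv.2.1 hInv.2.2
        have hyb : y = b := min_eq hInvM htail (hm ▸ hmergeMS)
        have hrestMS : l2.toMS + r2.toMS = ↑rest := by
          have : y ::ₘ (l2.toMS + r2.toMS) = b ::ₘ ↑rest := by
            rw [Multiset.cons_coe]
            exact (hm ▸ hmergeMS : (PHeap.node y l2 r2).toMS = ↑(b :: rest))
          rw [hyb] at this
          exact (Multiset.cons_inj_right b).mp this
        have hnewMS : (PHeap.push (PHeap.merge l2 r2) (x + y * 2)).toMS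
            = ↑(insortB rest (a + 2 * b)) := by
          rw [PHeap.toMS_push, PHeap.toMS_merge, hrestMS, insortB_coe, hxa, hyb]
          ring_nf
        have hnewInv : (PHeap.push (PHeap.merge l2 r2) (x + y * 2)).Inv :=
          PHeap.inv_push (PHeap.inv_merge hInvM.2.1 hInvM.2.2) _
        have hnewSorted : (insortB rest (a + 2 * b)).Sorted (· ≤ ·) :=
          insortB_sorted (List.sorted_cons.mp htail).2 _
        have hnewsz : (PHeap.push (PHeap.merge l2 r2) (x + y * 2)).size = n := by
          have e1 : (PHeap.push (PHeap.merge l2 r2) (x + y * 2)).toMS = (x + y * 2) ::ₘ ↑rest := by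
            rw [PHeap.toMS_push, PHeap.toMS_merge, hrestMS]
          have e2 := PHeap.card_toMS (PHeap.push (PHeap.merge l2 r2) (x + y * 2))
          rw [e1] at e2
          simp at e2
          have e3 : (a :: b :: rest).length = n + 1 := by rw [hlen, hsz]
          simp at e3
          omega
        have ih := IH (PHeap.push (PHeap.merge l2 r2) (x + y * 2))
          (insortB rest (a + 2 * b)) K (answer + 1) hnewsz hnewInv hnewSorted hnewMS
        have hstepA : loopA (n + 1) (PHeap.node x l r) K answer
            = loopA n (PHeap.push (PHeap.merge l2 r2) (x + y * 2)) K (answer + 1) := by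
          rw [loopA, if_pos hguard, hm]
        have hstepB : loopB (n + 1) (a :: b :: rest) K answer
            = loopB n (insortB rest (a + 2 * b)) K (answer + 1) := by
          rw [loopB, if_pos (hxa ▸ hguard.2)]
        rw [hstepA, hstepB]
        exact ⟨ih.1, ih.2.1, ih.2.2.1, ih.2.2.2.1,
          fun _ => ih.2.2.2.2 (insortB_ne_nil rest (a + 2 * b))⟩
      · -- stopping case
        have hA : loopA (n + 1) (PHeap.node x l r) K answer = (PHeap.node x l r, answer) := by
          rw [loopA, if_neg hguard]
        have hsne : s ≠ [] := by
          intro hc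
          rw [hc] at hlen
          simp [PHeap.size] at hlen
        obtain ⟨a, t, rfl⟩ : ∃ a t, s = a :: t := by
          cases s with
          | nil => exact absurd rfl hsne
          | cons a t => exact ⟨a, t, rfl⟩
        have hB : loopB (n + 1) (a :: t) K answer = (a :: t, answer) := by
          cases t with
          | nil => simp [loopB]
          | cons b rest =>
            have hsz2 : 1 < (PHeap.node x l r).size := by
              rw [← hlen]; simp
            have hxK : ¬ x < K := fun hc => hguard ⟨hsz2, hc⟩
            have hxa : x = a := min_eq hInv hSorted hms
            rw [loopB, if_neg (hxa ▸ hxK)]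
        rw [hA, hB]
        exact ⟨rfl, hms, hInv, hSorted, fun h => h⟩

theorem sorted_is_sorted (xs : List Int) :
    (PySem.List.sorted xs (fun x => x) false).Sorted (· ≤ ·) := by
  simpa using PySem.List.sorted_pairwise xs (fun x => x)

theorem sorted_coe (xs : List Int) :
    (↑(PySem.List.sorted xs (fun x => x) false) : Multiset Int) = ↑xs :=
  Multiset.coe_eq_coe.mpr (PySem.List.sorted_perm xs (fun x => x) false)

-- ===== VERDICT (by name: the statement is the Claim_ definition above) =====
theorem solution_spec : Claim_equal_solution := by
  intro scoville K _hdom hpre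
  unfold Spec_solution solution solution_alt
  have hInv := PHeap.inv_heapify scoville
  have hms : (PHeap.heapify scoville).toMS = ↑(PySem.List.sorted scoville (fun x => x) false) := by
    rw [PHeap.toMS_heapify, sorted_coe]
  have hlen : (PySem.List.sorted scoville (fun x => x) false).length
      = (PHeap.heapify scoville).size := by
    have := PHeap.card_toMS (PHeap.heapify scoville)
    rw [hms] at this
    simpa using this
  rw [hlen]
  obtain ⟨h1, h2, h3, h4, h5⟩ := loop_eq (PHeap.heapify scoville).size (PHeap.heapify scoville)
    (PySem.List.sorted scoville (fun x => x) false) K 0 rfl hInv (sorted_is_sorted scoville) hms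
  have hs0ne : PySem.List.sorted scoville (fun x => x) false ≠ [] := by
    intro hc
    exact hpre ((PySem.List.sorted_eq_nil_iff scoville (fun x => x) false).mp hc)
  obtain ⟨c, t, hq⟩ : ∃ c t,
      (loopB (PHeap.heapify scoville).size (PySem.List.sorted scoville (fun x => x) false) K 0).1 = c :: t := by
    cases hqq : (loopB (PHeap.heapify scoville).size (PySem.List.sorted scoville (fun x => x) false) K 0).1 with
    | nil => exact absurd hqq (h5 hs0ne)
    | cons c t => exact ⟨c, t, rfl⟩
  rw [hq] at h2 h4
  obtain ⟨x', l', r', hp⟩ : ∃ x' l' r',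
      (loopA (PHeap.heapify scoville).size (PHeap.heapify scoville) K 0).1 = PHeap.node x' l' r' := by
    cases hpp : (loopA (PHeap.heapify scoville).size (PHeap.heapify scoville) K 0).1 with
    | nil =>
      rw [hpp] at h2
      simp only [PHeap.toMS] at h2
      have h2' := (Multiset.coe_eq_zero (c :: t)).mp h2.symm
      simp at h2'
    | node x' l' r' => exact ⟨x', l', r', rfl⟩
  rw [hp] at h2 h3
  have hxc : x' = c := min_eq h3 h4 h2
  rcases hpair : loopA (PHeap.heapify scoville).size (PHeap.heapify scoville) K 0 with ⟨hh, a1⟩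
  rcases hqair : loopB (PHeap.heapify scoville).size (PySem.List.sorted scoville (fun x => x) false) K 0 with ⟨ss, a2⟩
  rw [hpair] at hp h1
  rw [hqair] at hq h1
  simp only at hp hq h1
  rw [hp, hq, hxc, h1]
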